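-- pv_equiv track=rewrite | github.com/aa694849243/leetcode_cj | 2401-2500/2499. 让数组不相等的最小总代价.py | minimumTotalCost
-- ===== SOURCE A (Python) =====
-- from typing import List
--
-- def minimumTotalCost(nums1: List[int], nums2: List[int]) -> int:
--     ans = mode = mx = swap_cnt = 0
--     n = len(nums1)
--     cnt = [0] * (n + 1)
--     for i, (a, b) in enumerate(zip(nums1, nums2)):
--         if a == b:
--             ans += i
--             cnt[a] += 1
--             swap_cnt += 1
--             if cnt[a] > mx:
--                 mx = cnt[a]
--                 mode = a
--     for i, (a, b) in enumerate(zip(nums1, nums2)):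
--         if 2 * cnt[mode] <= swap_cnt: break
--         if a != b and a != mode and b != mode:
--             swap_cnt += 1
--             ans += i
--     return ans if swap_cnt >= 2 * cnt[mode] else -1
-- ===== SOURCE B (Python) =====
-- def minimumTotalCost(nums1, nums2):
--     # positions where the two arrays clash, as (index, value) pairs
--     eq = [(i, a) for i, (a, b) in enumerate(zip(nums1, nums2)) if a == b]
--     ans = sum(i for i, _ in eq)
--     # Boyer–Moore majority vote over the clashing values (no frequency table:
--     # the mode only matters when it is a strict majority, and then the vote finds it)
--     m = votes = 0
--     for _, a in eq:
--         if votes == 0: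
--             m, votes = a, 1
--         elif a == m:
--             votes += 1
--         else:
--             votes -= 1
--     c = sum(1 for _, a in eq if a == m)
--     need = 2 * c - len(eq)
--     if need <= 0:
--         return ans
--     extra = [i for i, (a, b) in enumerate(zip(nums1, nums2))
--              if a != b and a != m and b != m]
--     if len(extra) < need:
--         return -1
--     return ans + sum(extra[:need])
-- ===== Notes on version B (the rewrite author's own statement) =====
-- stated objective: alternative
-- what changed: A's frequency table with incremental argmax tracking is replaced by a Boyer-Moore majority vote over the clashing values (the mode only matters when it is a strict majority, which the vote finds in O(1) space), and A's stateful break-loop compensation is replaced by computing the swap deficit and summing the first `need` filtered candidate indices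
-- outside the precondition, e.g. on minimumTotalCost([2, -1], [2, -1]): A returns -1, B returns 1; on minimumTotalCost([-1], [-1]): A returns -1, B returns -1
import Mathlib
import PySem

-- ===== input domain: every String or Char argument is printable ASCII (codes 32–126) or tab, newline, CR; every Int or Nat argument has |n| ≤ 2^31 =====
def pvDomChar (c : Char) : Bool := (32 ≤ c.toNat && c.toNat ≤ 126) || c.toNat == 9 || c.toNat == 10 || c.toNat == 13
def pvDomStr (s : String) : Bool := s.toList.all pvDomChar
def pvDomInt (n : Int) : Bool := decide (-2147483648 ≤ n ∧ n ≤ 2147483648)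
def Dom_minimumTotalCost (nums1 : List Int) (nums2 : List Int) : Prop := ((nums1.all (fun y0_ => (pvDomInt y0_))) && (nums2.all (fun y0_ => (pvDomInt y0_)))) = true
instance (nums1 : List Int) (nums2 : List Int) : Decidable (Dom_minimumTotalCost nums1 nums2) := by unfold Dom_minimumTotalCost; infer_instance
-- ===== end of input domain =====

-- B replaces A's frequency table + incremental argmax by a Boyer-Moore majority vote
-- (the mode only matters when it is a strict majority, which the vote finds) and A's
-- stateful compensation break-loop by a deficit + sum of the first `need` candidate
-- indices; same O(n) cost, proved equal on Pre_.


-- ===== PORT A =====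
-- first loop of A; state (ans, mode, mx, swap_cnt, cnt)
def loopA1 (ps : List (Int × Int × Int)) (st : Int × Int × Int × Int × List Int) :
    Int × Int × Int × Int × List Int :=
  ps.foldl (fun st p =>
    if p.2.1 = p.2.2 then
      -- ans += i; cnt[a] += 1 (IndexError excluded by Pre_); swap_cnt += 1; update mx/mode
      let cnt' := PySem.List.pySetD st.2.2.2.2 p.2.1 (PySem.List.pyGetD st.2.2.2.2 p.2.1 0 + 1)
      if PySem.List.pyGetD cnt' p.2.1 0 > st.2.2.1 then
        (st.1 + p.1, p.2.1, PySem.List.pyGetD cnt' p.2.1 0, st.2.2.2.1 + 1, cnt')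
      else (st.1 + p.1, st.2.1, st.2.2.1, st.2.2.2.1 + 1, cnt')
    else st) st

-- second loop of A, with its break; returns (ans, swap_cnt)
def loopA2 (ps : List (Int × Int × Int)) (ans swap : Int) (cnt : List Int) (mode : Int) :
    Int × Int :=
  match ps with
  | [] => (ans, swap)
  | p :: rest =>
    if 2 * PySem.List.pyGetD cnt mode 0 ≤ swap then (ans, swap)
    else if p.2.1 ≠ p.2.2 ∧ p.2.1 ≠ mode ∧ p.2.2 ≠ mode then
      loopA2 rest (ans + p.1) (swap + 1) cnt mode
    else loopA2 rest ans swap cnt mode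

def minimumTotalCost (nums1 : List Int) (nums2 : List Int) : Int :=
  let n := nums1.length
  let ps := PySem.List.enumerate (nums1.zip nums2) 0
  let st := loopA1 ps (0, 0, 0, 0, List.replicate (n + 1) 0)
  -- st = (ans, mode, mx, swap_cnt, cnt)
  let r := loopA2 ps st.1 st.2.2.2.1 st.2.2.2.2 st.2.1
  if r.2 ≥ 2 * PySem.List.pyGetD st.2.2.2.2 st.2.1 0 then r.1 else -1

-- ===== PORT B =====
-- one Boyer-Moore voting step on state (candidate, votes)
def bmStep (st : Int × Int) (a : Int) : Int × Int :=
  if st.2 = 0 then (a, 1)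
  else if a = st.1 then (st.1, st.2 + 1)
  else (st.1, st.2 - 1)

def minimumTotalCost_alt (nums1 : List Int) (nums2 : List Int) : Int :=
  let ps := PySem.List.enumerate (nums1.zip nums2) 0
  -- eq = [(i, a) for i,(a,b) in enumerate(zip(...)) if a == b]
  let eqp := (ps.filter (fun p => p.2.1 == p.2.2)).map (fun p => (p.1, p.2.1))
  let ans := (eqp.map (fun q => q.1)).sum
  -- Boyer-Moore majority vote over the clashing values
  let mv := eqp.foldl (fun st q => bmStep st q.2) ((0 : Int), (0 : Int))
  -- c = sum(1 for _, a in eq if a == m)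
  let c := eqp.foldl (fun s q => if q.2 = mv.1 then s + 1 else s) (0 : Int)
  let need := 2 * c - (eqp.length : Int)
  if need ≤ 0 then ans
  else
    let extra := (ps.filter (fun p => p.2.1 != p.2.2 && p.2.1 != mv.1 && p.2.2 != mv.1)).map (fun p => p.1)
    if (extra.length : Int) < need then -1
    else ans + (extra.take need.toNat).sum  -- extra[:need] with need > 0

-- ===== PRECONDITION & SPEC =====
-- Pre_ restricts values at equal positions to A's counter range [0, n] (the problem's stated
-- domain is 1..n): above n (or below -(n+1)) A raises IndexError, and negative values A counts
-- through Python negative-index wraparound into the same list, an accident of A's list counter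
-- that can merge the counters of two different values.
def Pre_minimumTotalCost (nums1 : List Int) (nums2 : List Int) : Prop :=
  ∀ p ∈ nums1.zip nums2, p.1 = p.2 → 0 ≤ p.1 ∧ p.1 ≤ (nums1.length : Int)
instance (nums1 : List Int) (nums2 : List Int) : Decidable (Pre_minimumTotalCost nums1 nums2) := by
  unfold Pre_minimumTotalCost; infer_instance
def pvWitness_minimumTotalCost : List Int × List Int := ([1, 1, 2], [1, 2, 2])

def Spec_minimumTotalCost (nums1 : List Int) (nums2 : List Int) (out : Int) : Prop :=
  out = minimumTotalCost_alt nums1 nums2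
instance (nums1 : List Int) (nums2 : List Int) (out : Int) : Decidable (Spec_minimumTotalCost nums1 nums2 out) := by
  unfold Spec_minimumTotalCost; infer_instance

-- ===== CLAIM (what is proved, stated in full; the proofs are below) =====
def Claim_equal_minimumTotalCost : Prop := ∀ (nums1 : List Int) (nums2 : List Int), Dom_minimumTotalCost nums1 nums2 → Pre_minimumTotalCost nums1 nums2 → Spec_minimumTotalCost nums1 nums2 (minimumTotalCost nums1 nums2)

-- ===== LEMMAS AND PROOFS =====
def eqVals (ps : List (Int × Int × Int)) : List Int :=
  (ps.filter (fun p => p.2.1 == p.2.2)).map (fun p => p.2.1)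
def eqIdxSum (ps : List (Int × Int × Int)) : Int :=
  ((ps.filter (fun p => p.2.1 == p.2.2)).map (fun p => p.1)).sum

theorem pyGetD_pySetD_int (cnt : List Int) (a v w : Int) (ha0 : 0 ≤ a) (hv0 : 0 ≤ v) (hv : v < (cnt.length : Int)) :
    PySem.List.pyGetD (PySem.List.pySetD cnt a w) v 0 =
      if v = a then w else PySem.List.pyGetD cnt v 0 := by
  rw [PySem.List.pySetD_of_nonneg _ _ ha0]
  rw [PySem.List.pyGetD_eq_getElem _ _ hv0 (by simpa using hv)]
  rw [List.getElem_set]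
  by_cases h : v = a
  · simp [h]
  · rw [if_neg (by omega), if_neg h, PySem.List.pyGetD_eq_getElem _ _ hv0 (by simpa using hv)]
theorem eqVals_cons_pos (p : Int × Int × Int) (ps : List (Int × Int × Int)) (h : p.2.1 = p.2.2) :
    eqVals (p :: ps) = p.2.1 :: eqVals ps := by simp [eqVals, h]
theorem eqVals_cons_neg (p : Int × Int × Int) (ps : List (Int × Int × Int)) (h : ¬ p.2.1 = p.2.2) :
    eqVals (p :: ps) = eqVals ps := by simp [eqVals, h]
theorem eqIdxSum_cons_pos (p : Int × Int × Int) (ps : List (Int × Int × Int)) (h : p.2.1 = p.2.2) :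
    eqIdxSum (p :: ps) = p.1 + eqIdxSum ps := by simp [eqIdxSum, h]
theorem eqIdxSum_cons_neg (p : Int × Int × Int) (ps : List (Int × Int × Int)) (h : ¬ p.2.1 = p.2.2) :
    eqIdxSum (p :: ps) = eqIdxSum ps := by simp [eqIdxSum, h]

theorem loopA1_spec (ps : List (Int × Int × Int)) (ans mode mx swap : Int) (cnt : List Int)
    (hpre : ∀ p ∈ ps, p.2.1 = p.2.2 → 0 ≤ p.2.1 ∧ p.2.1 < (cnt.length : Int))
    (hm0 : 0 ≤ mode) (hm1 : mode < (cnt.length : Int))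
    (hmx : PySem.List.pyGetD cnt mode 0 = mx)
    (hall : ∀ v : Int, 0 ≤ v → v < (cnt.length : Int) → PySem.List.pyGetD cnt v 0 ≤ mx) :
    ∃ mode' mx' cnt',
      loopA1 ps (ans, mode, mx, swap, cnt) =
        (ans + eqIdxSum ps, mode', mx', swap + ((eqVals ps).length : Int), cnt') ∧
      cnt'.length = cnt.length ∧
      0 ≤ mode' ∧ mode' < (cnt.length : Int) ∧
      (∀ v : Int, 0 ≤ v → v < (cnt.length : Int) →
        PySem.List.pyGetD cnt' v 0 = PySem.List.pyGetD cnt v 0 + ((eqVals ps).count v : Int)) ∧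
      PySem.List.pyGetD cnt' mode' 0 = mx' ∧
      (∀ v : Int, 0 ≤ v → v < (cnt.length : Int) → PySem.List.pyGetD cnt' v 0 ≤ mx') := by
  induction ps generalizing ans mode mx swap cnt with
  | nil =>
    refine ⟨mode, mx, cnt, ?_⟩
    simp [loopA1, eqVals, eqIdxSum, hmx, hm0, hm1]
    exact hall
  | cons p rest ih =>
    by_cases h : p.2.1 = p.2.2
    · obtain ⟨ha0, ha1⟩ := hpre p (by simp) h
      have hlen1 : (PySem.List.pySetD cnt p.2.1 (PySem.List.pyGetD cnt p.2.1 0 + 1)).length = cnt.length := by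
        rw [PySem.List.pySetD_of_nonneg _ _ ha0]; simp
      have hget1 : ∀ v : Int, 0 ≤ v → v < (cnt.length : Int) →
          PySem.List.pyGetD (PySem.List.pySetD cnt p.2.1 (PySem.List.pyGetD cnt p.2.1 0 + 1)) v 0 =
            if v = p.2.1 then PySem.List.pyGetD cnt p.2.1 0 + 1 else PySem.List.pyGetD cnt v 0 := by
        intro v hv0 hv1
        exact pyGetD_pySetD_int cnt p.2.1 v _ ha0 hv0 hv1
      have hca : PySem.List.pyGetD (PySem.List.pySetD cnt p.2.1 (PySem.List.pyGetD cnt p.2.1 0 + 1)) p.2.1 0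
          = PySem.List.pyGetD cnt p.2.1 0 + 1 := by
        rw [hget1 p.2.1 ha0 ha1]; simp
      have hstep : loopA1 (p :: rest) (ans, mode, mx, swap, cnt) =
          loopA1 rest (if PySem.List.pyGetD (PySem.List.pySetD cnt p.2.1 (PySem.List.pyGetD cnt p.2.1 0 + 1)) p.2.1 0 > mx then
              (ans + p.1, p.2.1, PySem.List.pyGetD (PySem.List.pySetD cnt p.2.1 (PySem.List.pyGetD cnt p.2.1 0 + 1)) p.2.1 0, swap + 1,
                PySem.List.pySetD cnt p.2.1 (PySem.List.pyGetD cnt p.2.1 0 + 1))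
            else (ans + p.1, mode, mx, swap + 1, PySem.List.pySetD cnt p.2.1 (PySem.List.pyGetD cnt p.2.1 0 + 1))) := by
        simp only [loopA1, List.foldl_cons, if_pos h]
      have hprer : ∀ q ∈ rest, q.2.1 = q.2.2 →
          0 ≤ q.2.1 ∧ q.2.1 < ((PySem.List.pySetD cnt p.2.1 (PySem.List.pyGetD cnt p.2.1 0 + 1)).length : Int) := by
        intro q hq hqe; rw [hlen1]; exact hpre q (by simp [hq]) hqe
      by_cases hgt : PySem.List.pyGetD (PySem.List.pySetD cnt p.2.1 (PySem.List.pyGetD cnt p.2.1 0 + 1)) p.2.1 0 > mx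
      · obtain ⟨mode', mx', cnt', heq, hl, hm0', hm1', hcount, hmode', hall'⟩ :=
          ih (ans + p.1) p.2.1
            (PySem.List.pyGetD (PySem.List.pySetD cnt p.2.1 (PySem.List.pyGetD cnt p.2.1 0 + 1)) p.2.1 0)
            (swap + 1) _ hprer ha0
            (by rw [hlen1]; exact ha1) rfl
            (by intro v hv0 hv1
                rw [hlen1] at hv1
                rw [hget1 v hv0 hv1]
                split
                · exact hca.ge
                · exact le_of_lt (lt_of_le_of_lt (hall v hv0 hv1) hgt))
        rw [hlen1] at hl hm1' hcount hall'
        refine ⟨mode', mx', cnt', ?_, hl, hm0', hm1', ?_, hmode', hall'⟩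
        · rw [hstep, if_pos hgt, heq, eqVals_cons_pos p rest h, eqIdxSum_cons_pos p rest h]
          simp only [Prod.mk.injEq, List.length_cons]
          refine ⟨by ring, trivial, trivial, by push_cast; ring, trivial⟩
        · intro v hv0 hv1
          rw [hcount v hv0 hv1, hget1 v hv0 hv1, eqVals_cons_pos p rest h, List.count_cons]
          by_cases hva : v = p.2.1
          · simp [hva]; ring
          · have hba : (p.2.1 == v) = false := by simp [Ne.symm hva]
            simp [hba, hva]
      · have hmna : mode ≠ p.2.1 := by
          intro hma
          rw [hca] at hgt
          rw [hma] at hmx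
          omega
        obtain ⟨mode', mx', cnt', heq, hl, hm0', hm1', hcount, hmode', hall'⟩ :=
          ih (ans + p.1) mode mx (swap + 1) _ hprer hm0 (by rw [hlen1]; exact hm1)
            (by rw [hget1 mode hm0 hm1, if_neg hmna]; exact hmx)
            (by intro v hv0 hv1
                rw [hlen1] at hv1
                rw [hget1 v hv0 hv1]
                split
                · omega
                · exact hall v hv0 hv1)
        rw [hlen1] at hl hm1' hcount hall'
        refine ⟨mode', mx', cnt', ?_, hl, hm0', hm1', ?_, hmode', hall'⟩
        · rw [hstep, if_neg hgt, heq, eqVals_cons_pos p rest h, eqIdxSum_cons_pos p rest h]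
          simp only [Prod.mk.injEq, List.length_cons]
          refine ⟨by ring, trivial, trivial, by push_cast; ring, trivial⟩
        · intro v hv0 hv1
          rw [hcount v hv0 hv1, hget1 v hv0 hv1, eqVals_cons_pos p rest h, List.count_cons]
          by_cases hva : v = p.2.1
          · simp [hva]; ring
          · have hba : (p.2.1 == v) = false := by simp [Ne.symm hva]
            simp [hba, hva]
    · have hstep : loopA1 (p :: rest) (ans, mode, mx, swap, cnt) =
          loopA1 rest (ans, mode, mx, swap, cnt) := by
        simp only [loopA1, List.foldl_cons, if_neg h]
      obtain ⟨mode', mx', cnt', heq, hl, hm0', hm1', hcount, hmode', hall'⟩ :=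
        ih ans mode mx swap cnt (fun q hq => hpre q (by simp [hq])) hm0 hm1 hmx hall
      refine ⟨mode', mx', cnt', ?_, hl, hm0', hm1', ?_, hmode', hall'⟩
      · rw [hstep, heq, eqVals_cons_neg p rest h, eqIdxSum_cons_neg p rest h]
      · intro v hv0 hv1
        rw [hcount v hv0 hv1, eqVals_cons_neg p rest h]

-- Boyer-Moore invariant: votes stay nonnegative, and any value other than the final
-- candidate occurs at most ((len + v_in - v_out) / 2) times (with a bonus for the incoming candidate).
theorem bm_inv (l : List Int) (m v : Int) (hv : 0 ≤ v) :
    0 ≤ (l.foldl bmStep (m, v)).2 ∧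
    ∀ x : Int, x ≠ (l.foldl bmStep (m, v)).1 →
      2 * (l.count x : Int) + (if x = m then 2 * v else 0) ≤
        (l.length : Int) + v - (l.foldl bmStep (m, v)).2 := by
  induction l generalizing m v with
  | nil =>
    refine ⟨hv, ?_⟩
    intro x hx
    simp only [List.foldl_nil] at hx ⊢
    rw [if_neg hx]
    simp
  | cons a rest ih =>
    by_cases h0 : v = 0
    · subst h0
      have hstep : (a :: rest).foldl bmStep (m, 0) = rest.foldl bmStep (a, 1) := by
        simp [bmStep]
      obtain ⟨hv', hinv⟩ := ih a 1 (by omega)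
      rw [hstep]
      refine ⟨hv', ?_⟩
      intro x hx
      have hIH := hinv x hx
      rw [List.count_cons, List.length_cons]
      by_cases hxa : x = a <;> by_cases hxm : x = m <;>
        simp only [hxa, hxm, beq_self_eq_true, beq_iff_eq, reduceIte] at hIH ⊢ <;>
        push_cast at hIH ⊢ <;> simp_all <;> omega
    · by_cases ham : a = m
      · have hstep : (a :: rest).foldl bmStep (m, v) = rest.foldl bmStep (m, v + 1) := by
          simp [bmStep, h0, ham]
        obtain ⟨hv', hinv⟩ := ih m (v + 1) (by omega)
        rw [hstep]
        refine ⟨hv', ?_⟩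
        intro x hx
        have hIH := hinv x hx
        rw [List.count_cons, List.length_cons]
        by_cases hxm : x = m <;>
          simp only [hxm, ham, beq_iff_eq, reduceIte] at hIH ⊢ <;>
          push_cast at hIH ⊢ <;> simp_all <;> omega
      · have hstep : (a :: rest).foldl bmStep (m, v) = rest.foldl bmStep (m, v - 1) := by
          simp [bmStep, h0, ham]
        obtain ⟨hv', hinv⟩ := ih m (v - 1) (by omega)
        rw [hstep]
        refine ⟨hv', ?_⟩
        intro x hx
        have hIH := hinv x hx
        rw [List.count_cons, List.length_cons]
        by_cases hxa : x = a <;> by_cases hxm : x = m <;>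
          simp only [hxa, hxm, beq_iff_eq, reduceIte] at hIH ⊢ <;>
          push_cast at hIH ⊢ <;> simp_all <;> omega

-- a strict majority is always the final Boyer-Moore candidate
theorem bm_majority (l : List Int) (x : Int) (h : (l.length : Int) < 2 * (l.count x : Int)) :
    (l.foldl bmStep ((0 : Int), (0 : Int))).1 = x := by
  by_contra hne
  obtain ⟨hv, hinv⟩ := bm_inv l 0 0 le_rfl
  have hx := hinv x (fun he => hne he.symm)
  split at hx <;> omega

-- B's counting pass equals List.count
theorem countFold (l : List Int) (m s : Int) :
    l.foldl (fun s a => if a = m then s + 1 else s) s = s + (l.count m : Int) := by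
  induction l generalizing s with
  | nil => simp
  | cons a rest ih =>
    rw [List.foldl_cons, List.count_cons, ih]
    by_cases h : a = m
    · rw [if_pos h, if_pos (by simp [h])]
      push_cast; ring
    · rw [if_neg h, if_neg (by simp [h])]
      push_cast; ring

theorem loop2_eq (ps : List (Int × Int × Int)) (ans swap : Int) (cnt : List Int) (mode : Int) :
    (if (loopA2 ps ans swap cnt mode).2 ≥ 2 * PySem.List.pyGetD cnt mode 0 then
        (loopA2 ps ans swap cnt mode).1 else -1)
    = (if 2 * PySem.List.pyGetD cnt mode 0 - swap ≤ 0 then ans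
       else
        if ((((ps.filter (fun p => p.2.1 != p.2.2 && p.2.1 != mode && p.2.2 != mode)).map (fun p => p.1)).length : Int)
              < 2 * PySem.List.pyGetD cnt mode 0 - swap) then -1
        else ans + (((ps.filter (fun p => p.2.1 != p.2.2 && p.2.1 != mode && p.2.2 != mode)).map (fun p => p.1)).take
              (2 * PySem.List.pyGetD cnt mode 0 - swap).toNat).sum) := by
  set c := PySem.List.pyGetD cnt mode 0 with hcdef
  induction ps generalizing ans swap with
  | nil =>
    simp only [loopA2, List.filter_nil, List.map_nil, List.length_nil, List.take_nil, List.sum_nil]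
    split_ifs <;> omega
  | cons p rest ih =>
    by_cases hb : 2 * c ≤ swap
    · rw [show loopA2 (p :: rest) ans swap cnt mode = (ans, swap) from by
        rw [loopA2, ← hcdef, if_pos hb]]
      simp only
      rw [if_pos (by omega), if_pos (by omega)]
    · by_cases hc : p.2.1 ≠ p.2.2 ∧ p.2.1 ≠ mode ∧ p.2.2 ≠ mode
      · have hfil : (p :: rest).filter (fun p => p.2.1 != p.2.2 && p.2.1 != mode && p.2.2 != mode)
            = p :: rest.filter (fun p => p.2.1 != p.2.2 && p.2.1 != mode && p.2.2 != mode) := by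
          rw [List.filter_cons, if_pos (by
            simp only [Bool.and_eq_true, bne_iff_ne]
            exact ⟨⟨hc.1, hc.2.1⟩, hc.2.2⟩)]
        rw [show loopA2 (p :: rest) ans swap cnt mode
            = loopA2 rest (ans + p.1) (swap + 1) cnt mode from by
          rw [loopA2, ← hcdef, if_neg hb, if_pos hc]]
        rw [ih (ans + p.1) (swap + 1), hfil]
        rw [if_neg (show ¬(2 * c - swap ≤ 0) from by omega)]
        simp only [List.map_cons, List.length_cons]
        push_cast
        by_cases h1 : 2 * c - (swap + 1) ≤ 0
        · rw [if_pos h1,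
            if_neg (show ¬((((rest.filter (fun p => p.2.1 != p.2.2 && p.2.1 != mode && p.2.2 != mode)).map (fun p => p.1)).length : Int) + 1 < 2 * c - swap) from by omega)]
          rw [show (2 * c - swap).toNat = 1 from by omega]
          simp
        · rw [if_neg h1]
          by_cases h2 : ((((rest.filter (fun p => p.2.1 != p.2.2 && p.2.1 != mode && p.2.2 != mode)).map (fun p => p.1)).length : Int)
                < 2 * c - (swap + 1))
          · rw [if_pos h2,
              if_pos (show ((((rest.filter (fun p => p.2.1 != p.2.2 && p.2.1 != mode && p.2.2 != mode)).map (fun p => p.1)).length : Int) + 1 < 2 * c - swap) from by omega)]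
          · rw [if_neg h2,
              if_neg (show ¬((((rest.filter (fun p => p.2.1 != p.2.2 && p.2.1 != mode && p.2.2 != mode)).map (fun p => p.1)).length : Int) + 1 < 2 * c - swap) from by omega)]
            rw [show (2 * c - swap).toNat = (2 * c - (swap + 1)).toNat + 1 from by omega]
            rw [List.take_succ_cons, List.sum_cons]
            ring
      · have hfil : (p :: rest).filter (fun p => p.2.1 != p.2.2 && p.2.1 != mode && p.2.2 != mode)
            = rest.filter (fun p => p.2.1 != p.2.2 && p.2.1 != mode && p.2.2 != mode) := by
          rw [List.filter_cons, if_neg (by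
            simp only [Bool.and_eq_true, bne_iff_ne]
            rintro ⟨⟨h1, h2⟩, h3⟩
            exact hc ⟨h1, h2, h3⟩)]
        rw [show loopA2 (p :: rest) ans swap cnt mode = loopA2 rest ans swap cnt mode from by
          rw [loopA2, ← hcdef, if_neg hb, if_neg hc]]
        rw [ih ans swap, hfil]

-- ===== VERDICT (by name: the statement is the Claim_ definition above) =====
theorem minimumTotalCost_spec : Claim_equal_minimumTotalCost := by
  intro nums1 nums2 _hdom hpre
  show minimumTotalCost nums1 nums2 = minimumTotalCost_alt nums1 nums2
  set n := nums1.length with hn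
  set ps := PySem.List.enumerate (nums1.zip nums2) 0 with hps
  have hmemps : ∀ p ∈ ps, p.2 ∈ nums1.zip nums2 := by
    intro p hp
    obtain ⟨k, hk, hkp⟩ := (PySem.List.mem_enumerate_iff _ _ _).mp hp
    subst hkp
    exact List.getElem_mem hk
  have hpre' : ∀ p ∈ ps, p.2.1 = p.2.2 →
      0 ≤ p.2.1 ∧ p.2.1 < ((List.replicate (n + 1) (0 : Int)).length : Int) := by
    intro p hp he
    obtain ⟨h0, h1⟩ := hpre p.2 (hmemps p hp) he
    rw [List.length_replicate]
    push_cast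
    omega
  have hget0 : ∀ v : Int, 0 ≤ v → v < ((List.replicate (n + 1) (0 : Int)).length : Int) →
      PySem.List.pyGetD (List.replicate (n + 1) (0 : Int)) v 0 = 0 := by
    intro v hv0 hv1
    rw [PySem.List.pyGetD_eq_getElem _ _ hv0 (by simpa using hv1)]
    simp
  obtain ⟨modeA, mxA, cntA, heqA, hlA, hA0, hA1, hcntA, hmodeA, hallA⟩ :=
    loopA1_spec ps 0 0 0 0 (List.replicate (n + 1) 0) hpre' le_rfl
      (by rw [List.length_replicate]; push_cast; omega)
      (hget0 0 le_rfl (by rw [List.length_replicate]; push_cast; omega))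
      (fun v hv0 hv1 => le_of_eq (hget0 v hv0 hv1))
  have hEc : ∀ v : Int, 0 ≤ v → v < ((List.replicate (n + 1) (0 : Int)).length : Int) →
      PySem.List.pyGetD cntA v 0 = ((eqVals ps).count v : Int) := by
    intro v hv0 hv1
    rw [hcntA v hv0 hv1, hget0 v hv0 hv1, zero_add]
  have hEmem : ∀ x ∈ eqVals ps, 0 ≤ x ∧ x < ((List.replicate (n + 1) (0 : Int)).length : Int) := by
    intro x hx
    obtain ⟨p, hp, hpx⟩ := List.mem_map.mp hx
    have hpf := List.mem_filter.mp hp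
    exact hpx ▸ hpre' p hpf.1 (by simpa using hpf.2)
  have hmodeA0 : ((eqVals ps).count modeA : Int) = mxA := by
    rw [← hEc modeA hA0 hA1]; exact hmodeA
  have hallA0 : ∀ v : Int, ((eqVals ps).count v : Int) ≤ mxA := by
    intro v
    by_cases hv : 0 ≤ v ∧ v < ((List.replicate (n + 1) (0 : Int)).length : Int)
    · rw [← hEc v hv.1 hv.2]; exact hallA v hv.1 hv.2
    · have hnv : v ∉ eqVals ps := fun hmem => hv (hEmem v hmem)
      rw [List.count_eq_zero_of_not_mem hnv]
      have := hmodeA0 ▸ Int.natCast_nonneg ((eqVals ps).count modeA)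
      omega
  -- the Boyer-Moore candidate of B and its count
  set bm := ((eqVals ps).foldl bmStep ((0 : Int), (0 : Int))).1 with hbm
  set cB := (((eqVals ps).count bm : Int)) with hcB
  -- reduce A to its loop2/deficit form
  have hA : minimumTotalCost nums1 nums2 =
      (if (loopA2 ps (eqIdxSum ps) (((eqVals ps).length : Int)) cntA modeA).2
            ≥ 2 * PySem.List.pyGetD cntA modeA 0 then
        (loopA2 ps (eqIdxSum ps) (((eqVals ps).length : Int)) cntA modeA).1 else -1) := by
    simp only [minimumTotalCost]
    rw [← hn, ← hps, heqA]
    norm_num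
  -- reduce B to its deficit form over eqVals ps
  have hB : minimumTotalCost_alt nums1 nums2 =
      (if 2 * cB - (((eqVals ps).length : Int)) ≤ 0 then eqIdxSum ps
       else
        if ((((ps.filter (fun p => p.2.1 != p.2.2 && p.2.1 != bm && p.2.2 != bm)).map (fun p => p.1)).length : Int)
              < 2 * cB - (((eqVals ps).length : Int))) then -1
        else eqIdxSum ps + (((ps.filter (fun p => p.2.1 != p.2.2 && p.2.1 != bm && p.2.2 != bm)).map (fun p => p.1)).take
              (2 * cB - (((eqVals ps).length : Int))).toNat).sum) := by
    simp only [minimumTotalCost_alt, ← hps]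
    have hmap2 : ((ps.filter (fun p => p.2.1 == p.2.2)).map (fun p => (p.1, p.2.1))).foldl
        (fun st q => bmStep st q.2) ((0 : Int), (0 : Int)) = (eqVals ps).foldl bmStep ((0 : Int), (0 : Int)) := by
      rw [List.foldl_map]
      unfold eqVals
      rw [List.foldl_map]
    have hcnt2 : ((ps.filter (fun p => p.2.1 == p.2.2)).map (fun p => (p.1, p.2.1))).foldl
        (fun s q => if q.2 = bm then s + 1 else s) (0 : Int) = cB := by
      rw [List.foldl_map]
      have : (eqVals ps).foldl (fun s a => if a = bm then s + 1 else s) (0 : Int) = cB := by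
        rw [countFold]; simp [hcB]
      rw [← this]
      unfold eqVals
      rw [List.foldl_map]
    have hans2 : (((ps.filter (fun p => p.2.1 == p.2.2)).map (fun p => (p.1, p.2.1))).map (fun q => q.1)).sum
        = eqIdxSum ps := by
      rw [List.map_map]
      rfl
    have hlen2 : (((ps.filter (fun p => p.2.1 == p.2.2)).map (fun p => (p.1, p.2.1))).length : Int)
        = ((eqVals ps).length : Int) := by
      simp [eqVals]
    rw [hmap2, hcnt2, hans2, hlen2]
  rw [hA, hB, loop2_eq, hmodeA]
  by_cases hmaj : 2 * mxA - (((eqVals ps).length : Int)) ≤ 0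
  · rw [if_pos hmaj, if_pos (by have := hallA0 bm; omega)]
  · -- strict majority: Boyer-Moore finds modeA, so bm = modeA and cB = mxA
    have hlenE : (((eqVals ps).length : Int)) < 2 * ((eqVals ps).count modeA : Int) := by
      rw [hmodeA0]; omega
    have hbmA : bm = modeA := by
      rw [hbm]; exact bm_majority _ _ hlenE
    have hcmx : cB = mxA := by rw [hcB, hbmA, hmodeA0]
    rw [hbmA, hcmx]
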